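-- pv_equiv track=rewrite | github.com/rachelyu98/IPASS_2023 | genetisch_algoritme.py | maak_rooster
-- ===== SOURCE A (Python) =====
-- def maak_rooster(individu):
--     """
--     Maakt een rooster op basis van het gegeven individu.
--
--     Parameters:
--         individu (dict): Het individu (rooster) om te converteren.
--
--     Returns:
--         list: Een lijst met dagroosters. Elk dagrooster bevat de dagnaam en de werknemers die op die dag werken.
--     """
--     # Een woordenboek met de dagnummers en bijbehorende dagnamen
--     dagen = {1: 'maandag', 2: 'dinsdag', 3: 'woensdag', 4: 'donderdag', 5: 'vrijdag', 6: 'zaterdag', 7: 'zondag'}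
--     # Een lege lijst om de dagroosters op te slaan
--     rooster = []
--
--
--     # Itereer over de dagnummers en dagnamen
--     for dag_num, dag_naam in dagen.items():
--         # Een lege lijst om de werknemers van de huidige dag op te slaan
--         werknemers = []
--         # Itereer over het individu (rooster) om werknemers te vinden die op de huidige dag werken
--         for werknemer, werkdagen in individu.items():
--             if dag_num in werkdagen:
--                 # Voeg de werknemer toe aan de lijst van werknemers voor de huidige dag
--                 werknemers.append(werknemer)
--         # Maak een dagrooster bestaande uit de dagnaam en de werknemers van die dag
--         dag_rooster = [dag_naam] + werknemers
--         # Voeg het dagrooster toe aan het rooster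
--         rooster.append(dag_rooster)
--     return rooster
-- ===== SOURCE B (Python) =====
-- def maak_rooster(individu):
--     """Eenmalige 'scatter'-pass: strooi elke werknemer in dag-emmers 1..7 en stel daarna het rooster samen."""
--     dagen = {1: 'maandag', 2: 'dinsdag', 3: 'woensdag', 4: 'donderdag', 5: 'vrijdag', 6: 'zaterdag', 7: 'zondag'}
--     buckets = {d: [] for d in dagen}
--     for werknemer, werkdagen in individu.items():
--         for dag in dict.fromkeys(werkdagen):
--             if dag in buckets:
--                 buckets[dag].append(werknemer)
--     return [[naam] + buckets[d] for d, naam in dagen.items()]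
-- ===== Notes on version B (the rewrite author's own statement) =====
-- stated objective: alternative
-- what changed: Replaces the 7-day outer loop that rescans all of individu per day with a single scatter pass over individu into per-day buckets (a dict of lists), assembling the schedule from the buckets at the end.
import Mathlib
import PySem

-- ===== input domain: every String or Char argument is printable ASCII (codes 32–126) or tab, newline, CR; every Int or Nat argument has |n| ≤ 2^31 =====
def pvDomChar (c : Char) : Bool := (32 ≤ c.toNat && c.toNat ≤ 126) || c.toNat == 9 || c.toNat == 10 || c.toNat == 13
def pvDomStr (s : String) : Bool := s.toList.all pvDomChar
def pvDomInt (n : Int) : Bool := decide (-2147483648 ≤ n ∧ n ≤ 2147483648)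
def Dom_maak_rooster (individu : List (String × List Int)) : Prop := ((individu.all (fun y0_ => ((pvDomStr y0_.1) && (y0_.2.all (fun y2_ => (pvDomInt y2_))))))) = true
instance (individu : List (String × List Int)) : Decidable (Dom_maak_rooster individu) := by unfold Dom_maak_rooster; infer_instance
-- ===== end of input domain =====

-- B replaces A's 7-day outer loop (one full rescan of individu per day) with a single
-- scatter pass over individu into per-day buckets; objective: alternative decomposition (same cost).

-- ===== PORT A =====
-- the literal dict {1:'maandag', …} iterated in insertion order
def pvDagen : List (Int × String) :=
  [(1, "maandag"), (2, "dinsdag"), (3, "woensdag"), (4, "donderdag"),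
   (5, "vrijdag"), (6, "zaterdag"), (7, "zondag")]

def maak_rooster (individu : List (String × List Int)) : List (List String) :=
  pvDagen.foldl (fun rooster p =>
    rooster ++ [p.2 :: individu.foldl
      (fun werknemers q => if p.1 ∈ q.2 then werknemers ++ [q.1] else werknemers) []]) []

-- ===== PORT B =====
-- buckets = {d: [] for d in dagen}
def pvBuckets0 : PySem.Dict Int (List String) :=
  PySem.Dict.ofList (pvDagen.map (fun p => (p.1, ([] : List String))))

-- 'if dag in buckets: buckets[dag].append(werknemer)'
def pvInnerScatter (w : String) (bk : PySem.Dict Int (List String)) (d : Int) :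
    PySem.Dict Int (List String) :=
  if bk.contains d then bk.modify d [] (fun l => l ++ [w]) else bk

-- 'for dag in dict.fromkeys(werkdagen): …'
def pvScatterWorker (bk : PySem.Dict Int (List String)) (q : String × List Int) :
    PySem.Dict Int (List String) :=
  (PySem.List.dedup q.2).foldl (pvInnerScatter q.1) bk

-- 'buckets[d]' is read as getD: d is always a key of buckets (exact here)
def maak_rooster_alt (individu : List (String × List Int)) : List (List String) :=
  let buckets := individu.foldl pvScatterWorker pvBuckets0
  pvDagen.map (fun p => p.2 :: buckets.getD p.1 [])

-- ===== PRECONDITION & SPEC =====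
def Spec_maak_rooster (individu : List (String × List Int)) (out : List (List String)) : Prop := out = maak_rooster_alt individu
instance (individu : List (String × List Int)) (out : List (List String)) : Decidable (Spec_maak_rooster individu out) := by unfold Spec_maak_rooster; infer_instance

-- ===== CLAIM (what is proved, stated in full; the proofs are below) =====
def Claim_equal_maak_rooster : Prop := ∀ (individu : List (String × List Int)), Dom_maak_rooster individu → Spec_maak_rooster individu (maak_rooster individu)

-- ===== LEMMAS AND PROOFS =====

-- the inner scatter fold never changes which keys a bucket dict has
theorem pv_contains_scatter (l : List Int) (w : String) (bk : PySem.Dict Int (List String))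
    (d : Int) : (l.foldl (pvInnerScatter w) bk).contains d = bk.contains d := by
  induction l generalizing bk with
  | nil => rfl
  | cons e t ih =>
      simp only [List.foldl_cons, ih]
      unfold pvInnerScatter
      split
      · rename_i hce
        simp only [PySem.Dict.contains_modify]
        by_cases hde : d = e
        · subst hde; simp [hce]
        · simp [hde]
      · rfl

-- one worker's scatter appends him once to the bucket of each (deduplicated) day
theorem pv_getD_scatter (l : List Int) (hl : l.Nodup) (w : String)
    (bk : PySem.Dict Int (List String)) (d : Int) (hd : bk.contains d = true) :
    (l.foldl (pvInnerScatter w) bk).getD d [] =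
      bk.getD d [] ++ (if d ∈ l then [w] else []) := by
  induction l generalizing bk with
  | nil => simp
  | cons e t ih =>
      obtain ⟨he, ht⟩ := List.nodup_cons.mp hl
      have hc : (pvInnerScatter w bk e).contains d = bk.contains d := by
        unfold pvInnerScatter; split
        · rename_i hce
          simp only [PySem.Dict.contains_modify]
          by_cases hde : d = e
          · subst hde; simp [hd]
          · simp [hde]
        · rfl
      simp only [List.foldl_cons]
      rw [ih ht _ (hc.trans hd)]
      by_cases hde : d = e
      · subst hde
        have : d ∉ t := he
        unfold pvInnerScatter
        rw [if_pos hd]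
        simp [PySem.Dict.getD_modify_self, this]
      · have hbk : (pvInnerScatter w bk e).getD d [] = bk.getD d [] := by
          unfold pvInnerScatter; split
          · simp [PySem.Dict.getD_modify, hde]
          · rfl
        rw [hbk]
        simp [hde]

-- A's per-day inner loop, closed form
theorem pv_foldA (individu : List (String × List Int)) (d : Int) (acc : List String) :
    individu.foldl (fun ws q => if d ∈ q.2 then ws ++ [q.1] else ws) acc =
      acc ++ (individu.filter (fun q => decide (d ∈ q.2))).map (·.1) := by
  induction individu generalizing acc with
  | nil => simp
  | cons q t ih =>
      simp only [List.foldl_cons, List.filter_cons]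
      by_cases h : d ∈ q.2 <;> simp [h, ih]

-- the whole scatter pass, read back at one day, is A's per-day scan
theorem pv_getD_outer (individu : List (String × List Int))
    (bk : PySem.Dict Int (List String)) (d : Int) (hd : bk.contains d = true) :
    (individu.foldl pvScatterWorker bk).getD d [] =
      bk.getD d [] ++ (individu.filter (fun q => decide (d ∈ q.2))).map (·.1) := by
  induction individu generalizing bk with
  | nil => simp
  | cons q t ih =>
      have hc : (pvScatterWorker bk q).contains d = true := by
        unfold pvScatterWorker; rw [pv_contains_scatter]; exact hd
      simp only [List.foldl_cons, List.filter_cons]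
      rw [ih _ hc]
      unfold pvScatterWorker
      rw [pv_getD_scatter _ (PySem.List.nodup_dedup _) _ _ _ hd]
      by_cases h : d ∈ q.2 <;>
        simp [h]

-- ===== VERDICT (by name: the statement is the Claim_ definition above) =====
theorem maak_rooster_spec : Claim_equal_maak_rooster := by
  intro individu _
  show maak_rooster individu = maak_rooster_alt individu
  unfold maak_rooster maak_rooster_alt
  have h : ∀ d : Int, pvBuckets0.contains d = true →
      (individu.foldl pvScatterWorker pvBuckets0).getD d [] =
        pvBuckets0.getD d [] ++ (individu.filter (fun q => decide (d ∈ q.2))).map (·.1) :=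
    fun d hd => pv_getD_outer individu pvBuckets0 d hd
  simp only [pvDagen, List.foldl_cons, List.foldl_nil, List.map_cons, List.map_nil,
    List.nil_append, List.cons_append]
  rw [pv_foldA, pv_foldA, pv_foldA, pv_foldA, pv_foldA, pv_foldA, pv_foldA,
    h 1 (by decide), h 2 (by decide), h 3 (by decide), h 4 (by decide),
    h 5 (by decide), h 6 (by decide), h 7 (by decide)]
  rw [show pvBuckets0.getD 1 [] = [] from by decide, show pvBuckets0.getD 2 [] = [] from by decide,
    show pvBuckets0.getD 3 [] = [] from by decide, show pvBuckets0.getD 4 [] = [] from by decide,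
    show pvBuckets0.getD 5 [] = [] from by decide, show pvBuckets0.getD 6 [] = [] from by decide,
    show pvBuckets0.getD 7 [] = [] from by decide]
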